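-- pv_equiv track=rewrite | github.com/Tersect-Browser/Tersect-browser | backend/src/scripts/find_barcode.py | find_dinucleotide_repeats_custom
-- ===== SOURCE A (Python) =====
-- def find_dinucleotide_repeats_custom(sequence):
--     """
--     Scans the sequence for 2-character repeats using your custom logic:
--     - If position i==i+2 and i+1==i+3 (i.e., two 2-character chunks match)
--     - Count how many times the same 2-bp pattern repeats in tandem
--     - Returns a list of (unit, count, start, end) for each repeat found
--     """
--     i = 0
--     results_repeat = ""
--     results_multi = ""
--     results_start_end = ""
--
--
--     while i < len(sequence) - 3:
--         first = sequence[i:i+2] # pos i and i+1 (b1 and b2)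
--         second = sequence[i+2:i+4] # pos i+2 and i+3 (b3 and b4)
--
--         if first == second:
--             count = 2
--             j = i + 4 # pos i+4 (b5)
--             while j + 1 < len(sequence) and sequence[j:j+2] == first:
--                 count += 1
--                 j += 2
--             if count > 2:
--                 results_repeat = results_repeat + "(" + first + ")"
--                 results_multi = results_multi + "(" + str(count) + ")"
--                 results_start_end = results_start_end + "(" + str(i) + ',' + str(j) + ")"
--             i = j  # Skip past the whole repeat
--         else:
--             i += 1  # No repeat, move one position right
--
--     return results_repeat, results_multi, results_start_end
-- ===== SOURCE B (Python) =====
-- def find_dinucleotide_repeats_custom(sequence):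
--     s = sequence
--     n = len(s)
--     # backward DP: cnt[i] = number of consecutive copies of the unit s[i:i+2] starting at i
--     cnt_rev = []
--     for i in range(n - 1, -1, -1):
--         if i + 3 < n and s[i] == s[i + 2] and s[i + 1] == s[i + 3]:
--             cnt_rev.append(cnt_rev[-2] + 1)
--         else:
--             cnt_rev.append(1)
--     cnt = cnt_rev[::-1]
--     units, counts, spans = [], [], []
--     i = 0
--     while i + 3 < n:
--         c = cnt[i]
--         if c > 1:
--             j = i + 2 * c
--             if c > 2:
--                 units.append('(' + s[i:i + 2] + ')')
--                 counts.append('(' + str(c) + ')')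
--                 spans.append('(' + str(i) + ',' + str(j) + ')')
--             i = j
--         else:
--             i += 1
--     return ''.join(units), ''.join(counts), ''.join(spans)
-- ===== Notes on version B (the rewrite author's own statement) =====
-- stated objective: alternative
-- what changed: Replaces A's nested scan-and-jump (inner while loop re-scanning each tandem run) with a backward dynamic-programming pass that precomputes, for every position, the number of consecutive dinucleotide copies starting there, followed by a single forward walk over that table; output strings are assembled by joining a list of fragments instead of repeated string concatenation.
import Mathlib
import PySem

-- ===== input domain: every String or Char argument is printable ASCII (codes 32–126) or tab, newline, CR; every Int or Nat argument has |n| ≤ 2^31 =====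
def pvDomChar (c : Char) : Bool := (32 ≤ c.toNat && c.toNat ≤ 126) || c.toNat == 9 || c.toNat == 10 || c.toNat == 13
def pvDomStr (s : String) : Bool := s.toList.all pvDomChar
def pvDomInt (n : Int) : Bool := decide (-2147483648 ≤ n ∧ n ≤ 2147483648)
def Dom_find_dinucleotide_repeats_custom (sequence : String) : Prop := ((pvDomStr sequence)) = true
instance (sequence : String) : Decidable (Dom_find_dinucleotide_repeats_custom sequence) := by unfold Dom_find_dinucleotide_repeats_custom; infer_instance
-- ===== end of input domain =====

-- B replaces A's inner re-scanning loop by a backward DP table of tandem-copy counts plus one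
-- forward walk (objective: alternative; same asymptotic cost).
-- Strings are ported through List Char (String.toList / String.ofList); slices s[a:a+2] as (drop a).take 2
-- (= PySem.List.slice at natural bounds, cf. PySem.List.slice_natCast_add).

-- ===== PORT A =====
-- inner while loop: `while j + 1 < len(sequence) and sequence[j:j+2] == first: count += 1; j += 2`
def pvInnerA (s : List Char) (first : List Char) (count j : Nat) : Nat × Nat :=
  if h : j + 1 < s.length ∧ (s.drop j).take 2 = first then
    pvInnerA s first (count + 1) (j + 2)
  else (count, j)
termination_by s.length - j
decreasing_by omega

-- the final j of the inner loop is ≥ its starting j (used for the outer loop's termination)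
theorem pvInnerA_ge (s first : List Char) (count j : Nat) : j ≤ (pvInnerA s first count j).2 := by
  fun_induction pvInnerA with
  | case1 count j h ih => omega
  | case2 count j h => simp

-- outer while loop of A; `first` is (s.drop i).take 2, `second` is (s.drop (i+2)).take 2,
-- and `(count, j)` = pvInnerA s first 2 (i+4) (the local is inlined at each use)
def pvOuterA (s : List Char) (i : Nat) (r m se : List Char) : List Char × List Char × List Char :=
  if h : i + 3 < s.length then
    if (s.drop i).take 2 = (s.drop (i + 2)).take 2 then
      if 2 < (pvInnerA s ((s.drop i).take 2) 2 (i + 4)).1 then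
        pvOuterA s (pvInnerA s ((s.drop i).take 2) 2 (i + 4)).2
          (r ++ ['('] ++ (s.drop i).take 2 ++ [')'])
          (m ++ ['('] ++ PySem.Int.toChars ((pvInnerA s ((s.drop i).take 2) 2 (i + 4)).1 : Int) ++ [')'])
          (se ++ ['('] ++ PySem.Int.toChars (i : Int) ++ [','] ++ PySem.Int.toChars ((pvInnerA s ((s.drop i).take 2) 2 (i + 4)).2 : Int) ++ [')'])
      else
        pvOuterA s (pvInnerA s ((s.drop i).take 2) 2 (i + 4)).2 r m se
    else
      pvOuterA s (i + 1) r m se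
  else (r, m, se)
termination_by s.length - i
decreasing_by
  · have := pvInnerA_ge s ((s.drop i).take 2) 2 (i + 4); omega
  · have := pvInnerA_ge s ((s.drop i).take 2) 2 (i + 4); omega
  · omega

def find_dinucleotide_repeats_custom (sequence : String) : String × String × String :=
  let s := sequence.toList
  let p := pvOuterA s 0 [] [] []
  (String.ofList p.1, String.ofList p.2.1, String.ofList p.2.2)

-- ===== PORT B =====
-- `for i in range(n-1, -1, -1): cnt_rev.append(cnt_rev[-2]+1 if … else 1)` followed by `cnt = cnt_rev[::-1]`:
-- the accumulator holds cnt_rev reversed (python append = cons here), so cnt_rev[-2] is acc.getD 1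
-- and the final accumulator IS cnt; i ≥ 0 on this range, so i.toNat is exact.
def pvBuildCnt (s : List Char) : List Nat :=
  (PySem.List.pyRange ((s.length : Int) - 1) (-1) (-1)).foldl
    (fun acc i =>
      let k := i.toNat
      (if k + 3 < s.length ∧ s.getD k ' ' = s.getD (k + 2) ' ' ∧ s.getD (k + 1) ' ' = s.getD (k + 3) ' '
       then acc.getD 1 1 + 1 else 1) :: acc)
    []

-- `while i + 3 < n: c = cnt[i]; if c > 1: j = i + 2*c; if c > 2: append …; i = j else: i += 1`
def pvLoopB (s : List Char) (cnt : List Nat) (i : Nat) (us cs ss : List (List Char)) :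
    List (List Char) × List (List Char) × List (List Char) :=
  if h : i + 3 < s.length then
    if hc : 1 < cnt.getD i 1 then
      if 2 < cnt.getD i 1 then
        pvLoopB s cnt (i + 2 * cnt.getD i 1)
          (us ++ [['('] ++ (s.drop i).take 2 ++ [')']])
          (cs ++ [['('] ++ PySem.Int.toChars (cnt.getD i 1 : Int) ++ [')']])
          (ss ++ [['('] ++ PySem.Int.toChars (i : Int) ++ [','] ++ PySem.Int.toChars ((i + 2 * cnt.getD i 1) : Int) ++ [')']])
      else pvLoopB s cnt (i + 2 * cnt.getD i 1) us cs ss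
    else pvLoopB s cnt (i + 1) us cs ss
  else (us, cs, ss)
termination_by s.length - i
decreasing_by all_goals omega

def find_dinucleotide_repeats_custom_alt (sequence : String) : String × String × String :=
  let s := sequence.toList
  let cnt := pvBuildCnt s
  let p := pvLoopB s cnt 0 [] [] []
  (String.ofList p.1.flatten, String.ofList p.2.1.flatten, String.ofList p.2.2.flatten)

-- ===== PRECONDITION & SPEC =====
def Spec_find_dinucleotide_repeats_custom (sequence : String) (out : String × String × String) : Prop := out = find_dinucleotide_repeats_custom_alt sequence
instance (sequence : String) (out : String × String × String) : Decidable (Spec_find_dinucleotide_repeats_custom sequence out) := by unfold Spec_find_dinucleotide_repeats_custom; infer_instance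

-- ===== CLAIM (what is proved, stated in full; the proofs are below) =====
def Claim_equal_find_dinucleotide_repeats_custom : Prop := ∀ (sequence : String), Dom_find_dinucleotide_repeats_custom sequence → Spec_find_dinucleotide_repeats_custom sequence (find_dinucleotide_repeats_custom sequence)

-- ===== LEMMAS AND PROOFS =====

-- "the two 2-char windows at i and i+2 match"
def pvMAt (s : List Char) (i : Nat) : Prop :=
  i + 3 < s.length ∧ s.getD i ' ' = s.getD (i + 2) ' ' ∧ s.getD (i + 1) ' ' = s.getD (i + 3) ' '

-- number of consecutive copies of the unit starting at i (condition = pvMAt s i, spelled out)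
def pvCnt (s : List Char) (i : Nat) : Nat :=
  if i + 3 < s.length ∧ s.getD i ' ' = s.getD (i + 2) ' ' ∧ s.getD (i + 1) ' ' = s.getD (i + 3) ' '
  then pvCnt s (i + 2) + 1 else 1
termination_by s.length - i
decreasing_by omega

theorem pvCnt_mat (s : List Char) (i : Nat) (h : pvMAt s i) : pvCnt s i = pvCnt s (i + 2) + 1 := by
  rw [pvCnt]; exact if_pos h

theorem pvCnt_nomat (s : List Char) (i : Nat) (h : ¬ pvMAt s i) : pvCnt s i = 1 := by
  rw [pvCnt]; exact if_neg (fun hc => h hc)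

theorem pvCnt_pos (s : List Char) (i : Nat) : 1 ≤ pvCnt s i := by
  rw [pvCnt]; split <;> omega

theorem pvCnt_eq_one_iff (s : List Char) (i : Nat) : pvCnt s i = 1 ↔ ¬ pvMAt s i := by
  by_cases h : pvMAt s i
  · rw [pvCnt_mat s i h]
    have := pvCnt_pos s (i + 2)
    constructor <;> intro h2 <;> [omega; exact absurd h h2]
  · simp [pvCnt_nomat s i h, h]

theorem pvTake2 (s : List Char) (i : Nat) (h : i + 1 < s.length) :
    (s.drop i).take 2 = [s.getD i ' ', s.getD (i + 1) ' '] := by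
  have h0 : i < s.length := by omega
  rw [List.drop_eq_getElem_cons h0, List.drop_eq_getElem_cons h,
    List.getD_eq_getElem?_getD, List.getD_eq_getElem?_getD,
    List.getElem?_eq_getElem h0, List.getElem?_eq_getElem h]
  rfl

-- the backward fold computes pvCnt at every position
theorem pvBuildCnt_aux (s : List Char) :
    ∀ (k i : Nat), i + k = s.length →
      (List.foldl
        (fun acc (t : Int) =>
          let j := t.toNat
          (if j + 3 < s.length ∧ s.getD j ' ' = s.getD (j + 2) ' ' ∧ s.getD (j + 1) ' ' = s.getD (j + 3) ' '
           then acc.getD 1 1 + 1 else 1) :: acc)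
        [] (((List.range' i k).map (fun n : Nat => (n : Int))).reverse))
      = (List.range' i k).map (pvCnt s) := by
  intro k
  induction k with
  | zero => intro i _; simp
  | succ k ih =>
    intro i hi
    rw [List.range'_succ]
    simp only [List.map_cons, List.reverse_cons, List.foldl_append, List.foldl_cons, List.foldl_nil]
    rw [ih (i + 1) (by omega)]
    have hm : (i + 3 < s.length ∧ s.getD i ' ' = s.getD (i + 2) ' ' ∧ s.getD (i + 1) ' ' = s.getD (i + 3) ' ')
        ↔ pvMAt s i := Iff.rfl
    simp only [Int.toNat_natCast]
    by_cases hmat : pvMAt s i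
    · have hk2 : 2 ≤ k := by have := hmat.1; omega
      have hget : ((List.range' (i + 1) k).map (pvCnt s)).getD 1 1 = pvCnt s (i + 2) := by
        have h1 : 1 < k := by omega
        rw [List.getD_eq_getElem?_getD]
        rw [List.getElem?_map]
        rw [List.getElem?_range' (by omega)]
        simp
      rw [if_pos (hm.mpr hmat), hget]
      have : pvCnt s i = pvCnt s (i + 2) + 1 := pvCnt_mat s i hmat
      rw [this]
    · rw [if_neg (fun hc => hmat (hm.mp hc))]
      have : pvCnt s i = 1 := (pvCnt_eq_one_iff s i).mpr hmat
      rw [this]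

theorem pvBuildCnt_eq (s : List Char) : pvBuildCnt s = (List.range' 0 s.length).map (pvCnt s) := by
  unfold pvBuildCnt
  rw [PySem.List.pyRange_neg_one_eq_reverse]
  have h0 : PySem.List.pyRange (-1 + 1) ((s.length : Int) - 1 + 1) 1
      = (List.range' 0 s.length).map (fun n : Nat => (n : Int)) := by
    rw [show (-1 : Int) + 1 = 0 by ring, show (s.length : Int) - 1 + 1 = (s.length : Int) by ring]
    rw [PySem.List.pyRange_one]
    simp only [Int.sub_zero, Int.toNat_natCast, List.range_eq_range']
    apply List.map_congr_left; intro a _; simp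
  rw [h0]
  exact pvBuildCnt_aux s s.length 0 (by omega)

theorem pvBuildCnt_getD (s : List Char) (i : Nat) (h : i < s.length) :
    (pvBuildCnt s).getD i 1 = pvCnt s i := by
  rw [pvBuildCnt_eq, List.getD_eq_getElem?_getD, List.getElem?_map, List.getElem?_range' (by omega)]
  simp

-- the inner loop of A computes pvCnt
theorem pvInnerA_eq (s : List Char) (first : List Char) :
    ∀ (i c : Nat), i + 1 < s.length → (s.drop i).take 2 = first →
      pvInnerA s first c (i + 2) = (c + pvCnt s i - 1, i + 2 + 2 * (pvCnt s i - 1)) := by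
  have H : ∀ (d i c : Nat), s.length - i ≤ d → i + 1 < s.length → (s.drop i).take 2 = first →
      pvInnerA s first c (i + 2) = (c + pvCnt s i - 1, i + 2 + 2 * (pvCnt s i - 1)) := by
    intro d
    induction d with
    | zero => intro i c hd hi _; omega
    | succ d ih =>
      intro i c hd hi hfirst
      have hfl : first = [s.getD i ' ', s.getD (i + 1) ' '] := by rw [← hfirst, pvTake2 s i hi]
      have hcond : (i + 2 + 1 < s.length ∧ (s.drop (i + 2)).take 2 = first) ↔ pvMAt s i := by
        constructor
        · rintro ⟨h1, h2⟩
          refine ⟨by omega, ?_, ?_⟩ <;>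
          · rw [pvTake2 s (i + 2) (by omega), hfl] at h2
            simp at h2; tauto
        · rintro ⟨h1, h2, h3⟩
          exact ⟨by omega, by rw [pvTake2 s (i + 2) (by omega), hfl, h2, h3]⟩
      rw [pvInnerA]
      by_cases hmat : pvMAt s i
      · rw [dif_pos (hcond.mpr hmat)]
        have h2 : (s.drop (i + 2)).take 2 = first := (hcond.mpr hmat).2
        have hrec := ih (i + 2) (c + 1) (by omega) (by have := hmat.1; omega) h2
        rw [show i + 2 + 2 = (i + 2) + 2 by ring] at *
        rw [hrec]
        have hc2 : pvCnt s i = pvCnt s (i + 2) + 1 := pvCnt_mat s i hmat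
        have hp := pvCnt_pos s (i + 2)
        rw [hc2]
        simp only [Prod.mk.injEq]; omega
      · rw [dif_neg (fun hc => hmat (hcond.mp hc))]
        have : pvCnt s i = 1 := (pvCnt_eq_one_iff s i).mpr hmat
        rw [this]
        simp only [Prod.mk.injEq]; exact ⟨by omega, trivial⟩
  intro i c h1 h2; exact H (s.length - i) i c (le_refl _) h1 h2

-- main loop correspondence: A's string accumulators are the flattenings of B's list accumulators
theorem pvLoop_corr (s : List Char) :
    ∀ (i : Nat) (us cs ss : List (List Char)),
      pvOuterA s i us.flatten cs.flatten ss.flatten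
      = ((pvLoopB s (pvBuildCnt s) i us cs ss).1.flatten,
         (pvLoopB s (pvBuildCnt s) i us cs ss).2.1.flatten,
         (pvLoopB s (pvBuildCnt s) i us cs ss).2.2.flatten) := by
  have H : ∀ (d i : Nat), s.length - i ≤ d → ∀ (us cs ss : List (List Char)),
      pvOuterA s i us.flatten cs.flatten ss.flatten
      = ((pvLoopB s (pvBuildCnt s) i us cs ss).1.flatten,
         (pvLoopB s (pvBuildCnt s) i us cs ss).2.1.flatten,
         (pvLoopB s (pvBuildCnt s) i us cs ss).2.2.flatten) := by
    intro d
    induction d with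
    | zero =>
      intro i hd us cs ss
      rw [pvOuterA, pvLoopB, dif_neg (by omega), dif_neg (by omega)]
    | succ d ih =>
      intro i hd us cs ss
      by_cases h : i + 3 < s.length
      · have hc : (pvBuildCnt s).getD i 1 = pvCnt s i := pvBuildCnt_getD s i (by omega)
        have hmatch_iff : ((s.drop i).take 2 = (s.drop (i + 2)).take 2) ↔ pvMAt s i := by
          rw [pvTake2 s i (by omega), pvTake2 s (i + 2) (by omega)]
          unfold pvMAt
          simp [h]
        rw [pvOuterA, pvLoopB, dif_pos h, dif_pos h]
        by_cases hmat : pvMAt s i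
        · have hsec : (s.drop (i + 2)).take 2 = (s.drop i).take 2 := (hmatch_iff.mpr hmat).symm
          have hcv : pvCnt s i = pvCnt s (i + 2) + 1 := pvCnt_mat s i hmat
          have hp := pvCnt_pos s (i + 2)
          have hinner : pvInnerA s ((s.drop i).take 2) 2 (i + 4) = (pvCnt s i, i + 2 * pvCnt s i) := by
            have h0 := pvInnerA_eq s ((s.drop i).take 2) (i + 2) 2 (by omega) hsec
            rw [show i + 2 + 2 = i + 4 by ring] at h0
            rw [h0, hcv]
            simp only [Prod.mk.injEq]; omega
          have hgt1 : 1 < (pvBuildCnt s).getD i 1 := by rw [hc]; omega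
          have hge : 2 ≤ pvCnt s i := by omega
          rw [if_pos (hmatch_iff.mpr hmat), dif_pos hgt1, hinner, hc]
          by_cases hbig : 2 < pvCnt s i
          · rw [if_pos hbig, if_pos hbig]
            have hih := ih (i + 2 * pvCnt s i) (by omega)
              (us ++ [['('] ++ (s.drop i).take 2 ++ [')']])
              (cs ++ [['('] ++ PySem.Int.toChars ((pvCnt s i : Nat) : Int) ++ [')']])
              (ss ++ [['('] ++ PySem.Int.toChars ((i : Nat) : Int) ++ [','] ++ PySem.Int.toChars (((i + 2 * pvCnt s i : Nat)) : Int) ++ [')']])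
            simp only [List.flatten_append, List.flatten_cons, List.flatten_nil, List.append_nil,
              ← List.append_assoc] at hih ⊢
            exact hih
          · rw [if_neg hbig, if_neg hbig]
            exact ih (i + 2 * pvCnt s i) (by omega) us cs ss
        · have hle1 : ¬ 1 < (pvBuildCnt s).getD i 1 := by
            rw [hc, (pvCnt_eq_one_iff s i).mpr hmat]; omega
          rw [if_neg (fun hc2 => hmat (hmatch_iff.mp hc2)), dif_neg hle1]
          exact ih (i + 1) (by omega) us cs ss
      · rw [pvOuterA, pvLoopB, dif_neg h, dif_neg h]
  intro i us cs ss; exact H (s.length - i) i (le_refl _) us cs ss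

-- ===== VERDICT (by name: the statement is the Claim_ definition above) =====
theorem find_dinucleotide_repeats_custom_spec : Claim_equal_find_dinucleotide_repeats_custom := by
  intro sequence _
  unfold Spec_find_dinucleotide_repeats_custom find_dinucleotide_repeats_custom find_dinucleotide_repeats_custom_alt
  have := pvLoop_corr sequence.toList 0 [] [] []
  simp only [List.flatten_nil] at this
  simp only [this]
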